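-- pv_equiv track=rewrite | github.com/dekuNukem/duckyPad | pc_software/ds3/ds_syntax_check.py | parse_mouse
-- ===== SOURCE A (Python) =====
-- cmd_LMOUSE = "LMOUSE"
--
-- cmd_RMOUSE = "RMOUSE"
--
-- cmd_MMOUSE = "MMOUSE"
--
-- cmd_MOUSE_MOVE = "MOUSE_MOVE"
--
-- cmd_MOUSE_WHEEL = "MOUSE_WHEEL"
--
-- mouse_commands = [cmd_LMOUSE, cmd_RMOUSE, cmd_MMOUSE, cmd_MOUSE_MOVE, cmd_MOUSE_WHEEL]
--
-- PARSE_OK = 0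
--
-- PARSE_ERROR = 1
--
-- def parse_mouse(ducky_line):
-- 	mouse_command_list = [x for x in mouse_commands if x in ducky_line]
-- 	if len(mouse_command_list) != 1:
-- 		return PARSE_ERROR, 'too many arguments'
-- 	this_mouse_command = mouse_command_list[0]
-- 	if this_mouse_command == cmd_LMOUSE:
-- 		return PARSE_OK, "Success"
-- 	elif this_mouse_command == cmd_RMOUSE:
-- 		return PARSE_OK, "Success"
-- 	elif this_mouse_command == cmd_MMOUSE:
-- 		return PARSE_OK, "Success"
-- 	elif this_mouse_command == cmd_MOUSE_MOVE:
-- 		try: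
-- 			x_amount = int([x for x in ducky_line.split(' ') if len(x) > 0][1])
-- 			y_amount = int([x for x in ducky_line.split(' ') if len(x) > 0][2])
-- 			if x_amount > 127 or x_amount < -127:
-- 				raise ValueError
-- 			if y_amount > 127 or y_amount < -127:
-- 				raise ValueError
-- 		except:
-- 			return PARSE_ERROR, 'should be between -127 to 127'
-- 		return PARSE_OK, "Success"
-- 	elif this_mouse_command == cmd_MOUSE_WHEEL:
-- 		try:
-- 			amount = int([x for x in ducky_line.split(' ') if len(x) > 0][1])
-- 			if amount > 127 or amount < -127:
-- 				raise ValueError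
-- 		except:
-- 			return PARSE_ERROR, 'should be between -127 to 127'
-- 		return PARSE_OK, "Success"
-- 	return PARSE_ERROR, "Invalid mouse command"
-- ===== SOURCE B (Python) =====
-- PARSE_OK = 0
-- PARSE_ERROR = 1
--
-- # command name -> whitespace-token indices that must parse as ints in -127..127
-- MOUSE_ARG_IDX = {
--     "LMOUSE": [],
--     "RMOUSE": [],
--     "MMOUSE": [],
--     "MOUSE_MOVE": [1, 2],
--     "MOUSE_WHEEL": [1],
-- }
--
-- def parse_mouse(ducky_line):
--     matches = [c for c in MOUSE_ARG_IDX if c in ducky_line]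
--     if len(matches) != 1:
--         return PARSE_ERROR, 'too many arguments'
--     tokens = [t for t in ducky_line.split(' ') if t]
--     for idx in MOUSE_ARG_IDX[matches[0]]:
--         try:
--             v = int(tokens[idx])
--         except (IndexError, ValueError):
--             return PARSE_ERROR, 'should be between -127 to 127'
--         if v > 127 or v < -127:
--             return PARSE_ERROR, 'should be between -127 to 127'
--     return PARSE_OK, 'Success'
-- ===== Notes on version B (the rewrite author's own statement) =====
-- stated objective: simpler
-- what changed: Replaced A's five-way elif chain (with two near-duplicate try blocks re-splitting the line per index) by a table mapping each command to the token indices it must range-check, plus one shared loop that splits once and validates each index.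
import Mathlib
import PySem

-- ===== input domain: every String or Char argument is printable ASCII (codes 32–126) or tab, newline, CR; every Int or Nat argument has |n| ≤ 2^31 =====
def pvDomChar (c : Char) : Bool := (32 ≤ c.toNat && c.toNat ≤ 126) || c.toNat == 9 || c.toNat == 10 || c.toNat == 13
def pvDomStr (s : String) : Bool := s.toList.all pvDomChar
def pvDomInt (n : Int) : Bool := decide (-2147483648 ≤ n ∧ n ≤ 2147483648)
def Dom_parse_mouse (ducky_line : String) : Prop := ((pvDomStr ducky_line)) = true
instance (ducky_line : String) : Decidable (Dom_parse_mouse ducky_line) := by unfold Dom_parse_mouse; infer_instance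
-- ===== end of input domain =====

-- B replaces A's five-way elif chain by a command → argument-index-list table and one
-- range-checking loop over those indices (objective: simpler; same cost).


-- ===== PORT A =====
def mouse_commands : List String := ["LMOUSE", "RMOUSE", "MMOUSE", "MOUSE_MOVE", "MOUSE_WHEEL"]

-- tokens of 'ducky_line.split(' ')' with the empties dropped (A builds this list twice per index; same value)
def pvToksA (ducky_line : String) : List String :=
  ((PySem.Str.split? ducky_line " ").getD []).filter (fun x => PySem.Str.len x > 0)

def parse_mouse (ducky_line : String) : Int × String :=
  let mouse_command_list := mouse_commands.filter (fun x => PySem.Str.isIn x ducky_line)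
  if mouse_command_list.length ≠ 1 then (1, "too many arguments")
  else
    let this_mouse_command := mouse_command_list.getD 0 ""
    if this_mouse_command == "LMOUSE" then (0, "Success")
    else if this_mouse_command == "RMOUSE" then (0, "Success")
    else if this_mouse_command == "MMOUSE" then (0, "Success")
    else if this_mouse_command == "MOUSE_MOVE" then
      -- try: x = int(tokens[1]); y = int(tokens[2]); range checks; bare except → error
      match (PySem.List.pyGet? (pvToksA ducky_line) 1).bind PySem.Int.ofStr? with
      | none => (1, "should be between -127 to 127")
      | some x_amount =>
        match (PySem.List.pyGet? (pvToksA ducky_line) 2).bind PySem.Int.ofStr? with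
        | none => (1, "should be between -127 to 127")
        | some y_amount =>
          if x_amount > 127 ∨ x_amount < -127 then (1, "should be between -127 to 127")
          else if y_amount > 127 ∨ y_amount < -127 then (1, "should be between -127 to 127")
          else (0, "Success")
    else if this_mouse_command == "MOUSE_WHEEL" then
      match (PySem.List.pyGet? (pvToksA ducky_line) 1).bind PySem.Int.ofStr? with
      | none => (1, "should be between -127 to 127")
      | some amount =>
        if amount > 127 ∨ amount < -127 then (1, "should be between -127 to 127")
        else (0, "Success")
    else (1, "Invalid mouse command")

-- ===== PORT B =====
def MOUSE_ARG_IDX : PySem.Dict String (List Int) :=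
  PySem.Dict.ofList
    [("LMOUSE", []), ("RMOUSE", []), ("MMOUSE", []), ("MOUSE_MOVE", [1, 2]), ("MOUSE_WHEEL", [1])]

-- the for-loop of B: check each required token index in turn
def pvCheckArgs (tokens : List String) : List Int → Int × String
  | [] => (0, "Success")
  | idx :: rest =>
    match (PySem.List.pyGet? tokens idx).bind PySem.Int.ofStr? with
    | none => (1, "should be between -127 to 127")
    | some v =>
      if v > 127 ∨ v < -127 then (1, "should be between -127 to 127")
      else pvCheckArgs tokens rest

def parse_mouse_alt (ducky_line : String) : Int × String :=
  let cmd_matches := MOUSE_ARG_IDX.keys.filter (fun c => PySem.Str.isIn c ducky_line)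
  if cmd_matches.length ≠ 1 then (1, "too many arguments")
  else
    let tokens := ((PySem.Str.split? ducky_line " ").getD []).filter (fun t => t ≠ "")
    pvCheckArgs tokens (MOUSE_ARG_IDX.getD (cmd_matches.getD 0 "") [])

-- ===== PRECONDITION & SPEC =====
def Spec_parse_mouse (ducky_line : String) (out : Int × String) : Prop := out = parse_mouse_alt ducky_line
instance (ducky_line : String) (out : Int × String) : Decidable (Spec_parse_mouse ducky_line out) := by unfold Spec_parse_mouse; infer_instance

-- ===== CLAIM (what is proved, stated in full; the proofs are below) =====
def Claim_equal_parse_mouse : Prop := ∀ (ducky_line : String), Dom_parse_mouse ducky_line → Spec_parse_mouse ducky_line (parse_mouse ducky_line)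

-- ===== LEMMAS AND PROOFS =====

-- A's filter 'len x > 0' and B's filter 'x ≠ ""' keep the same tokens
theorem pvToks_eq (s : String) :
    ((PySem.Str.split? s " ").getD []).filter (fun t => t ≠ "") = pvToksA s := by
  unfold pvToksA
  apply List.filter_congr
  intro t _
  rcases h : t.toList with _ | ⟨a, as⟩
  · have ht : t = "" := String.toList_eq_nil_iff.mp h
    subst ht; simp [PySem.Str.len]
  · have ht : t ≠ "" := by
      intro he; rw [he] at h; simp at h
    simp [PySem.Str.len, ht, h]

theorem pvKeys_eq : MOUSE_ARG_IDX.keys = mouse_commands := by decide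

-- ===== VERDICT (by name: the statement is the Claim_ definition above) =====
theorem parse_mouse_spec : Claim_equal_parse_mouse := by
  intro s _
  unfold Spec_parse_mouse parse_mouse parse_mouse_alt
  rw [pvKeys_eq, pvToks_eq]
  set L := mouse_commands.filter (fun x => PySem.Str.isIn x s) with hL
  by_cases hlen : L.length ≠ 1
  · simp [hlen]
  · simp only [hlen, if_false]
    simp only [ne_eq, not_not] at hlen
    match hc : L, hlen with
    | [x], _ =>
      have hm : x ∈ List.filter (fun x => PySem.Str.isIn x s) mouse_commands := by
        rw [← hL]; exact List.mem_cons_self ..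
      have hx : x ∈ mouse_commands := (List.mem_filter.mp hm).1
      simp only [mouse_commands, List.mem_cons, List.not_mem_nil, or_false] at hx
      rcases hx with h | h | h | h | h <;> subst h <;>
        simp only [List.getD, List.getElem?_cons_zero, Option.getD_some]
      · rfl
      · rfl
      · rfl
      · -- MOUSE_MOVE
        have hg : MOUSE_ARG_IDX.getD "MOUSE_MOVE" [] = [1, 2] := by decide
        show _ = pvCheckArgs (pvToksA s) _
        rw [hg]
        rcases h1 : (PySem.List.pyGet? (pvToksA s) 1).bind PySem.Int.ofStr? with _ | v1
        · simp [pvCheckArgs, h1]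
        · rcases h2 : (PySem.List.pyGet? (pvToksA s) 2).bind PySem.Int.ofStr? with _ | v2
          · simp [pvCheckArgs, h1, h2]
          · simp [pvCheckArgs, h1, h2]
      · -- MOUSE_WHEEL
        have hg : MOUSE_ARG_IDX.getD "MOUSE_WHEEL" [] = [1] := by decide
        show _ = pvCheckArgs (pvToksA s) _
        rw [hg]
        rcases h1 : (PySem.List.pyGet? (pvToksA s) 1).bind PySem.Int.ofStr? with _ | v1
        · simp [pvCheckArgs, h1]
        · simp [pvCheckArgs, h1]
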